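-- pv_equiv track=rewrite | github.com/Jaeyong-seo/Algorithm_test | programmers/코딩테스트/그렙1.py | solution
-- ===== SOURCE A (Python) =====
-- def solution(arr):
--     arr.sort()
--     check = len(arr)
--
--     for val in arr:
--         a = len(arr) - len([i for i in arr if i > val])
--         b = len(arr) - a
--         v = abs(a-b)
--
--         if v < check:
--             check=v
--             answer = val
--     return answer +1
-- ===== SOURCE B (Python) =====
-- def solution(arr):
--     # One pass over the sorted values by group: for each distinct value v,
--     # c = #(elements <= v) via running count, score = |2c - n|.
--     # (A sorts arr in place; B leaves arr unmodified -- return value is the same.)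
--     s = sorted(arr)
--     n = len(s)
--     best = n
--     answer = None
--     i = 0
--     while i < n:
--         val = s[i]
--         j = i + 1
--         while j < n and s[j] == val:
--             j += 1
--         v = abs(2 * j - n)
--         if v < best:
--             best = v
--             answer = val
--         i = j
--     return answer + 1
-- ===== Notes on version B (the rewrite author's own statement) =====
-- stated objective: faster
-- what changed: B sorts once and scans the sorted list group-by-group with a running cumulative count to get |#(<=v) - #(>v)| in O(1) per value, instead of A's inner list-comprehension scan of the whole array for every element.
import Mathlib
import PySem

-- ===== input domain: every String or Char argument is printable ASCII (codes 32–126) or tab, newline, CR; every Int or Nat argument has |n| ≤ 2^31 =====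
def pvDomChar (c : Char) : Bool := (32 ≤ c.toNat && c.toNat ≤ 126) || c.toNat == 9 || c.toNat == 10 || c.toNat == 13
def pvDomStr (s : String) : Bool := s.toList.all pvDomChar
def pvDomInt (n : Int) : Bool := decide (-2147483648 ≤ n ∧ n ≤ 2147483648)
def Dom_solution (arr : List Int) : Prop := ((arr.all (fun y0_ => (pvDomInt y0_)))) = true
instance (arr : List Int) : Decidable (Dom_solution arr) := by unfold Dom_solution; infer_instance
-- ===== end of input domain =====

-- B replaces A's per-element whole-array scan by one sort plus a single group-by-group
-- pass with a running cumulative count (A is O(n^2), B is O(n log n)).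
-- A sorts arr in place; B does not mutate arr — the equivalence is about the return value.

-- ===== PORT A =====
-- one iteration of A's for-loop: state = (check, answer?); `answer` starts unassigned
def solStep (s : List Int) (st : Int × Option Int) (val : Int) : Int × Option Int :=
  let a : Int := (s.length : Int) - ((s.filter (fun i => decide (val < i))).length : Int)
  let b : Int := (s.length : Int) - a
  let v : Int := |a - b|
  if v < st.1 then (v, some val) else st

def solution (arr : List Int) : Int :=
  let s := PySem.List.sorted arr (fun x => x) false   -- arr.sort()
  let check : Int := (s.length : Int)
  let st := s.foldl (solStep s) (check, none)
  -- `answer + 1`; if the loop never assigned `answer`, Python raises NameError (outside Pre_): 0 here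
  match st.2 with
  | some ans => ans + 1
  | none => 0

-- ===== PORT B =====
-- B's outer while loop: walk the sorted list by groups of equal values;
-- c = number of elements already consumed (all < current value).
def solAltGo (n : Int) : List Int → Int → Int → Option Int → Option Int
  | [], _, _, ans => ans
  | val :: rest, c, best, ans =>
      let same := rest.takeWhile (fun x => x == val)   -- inner while: skip duplicates
      let restr := rest.dropWhile (fun x => x == val)
      let j : Int := c + 1 + (same.length : Int)
      let v : Int := |2 * j - n|
      if v < best then solAltGo n restr j v (some val)
      else solAltGo n restr j best ans
  termination_by l => l.length
  decreasing_by
    all_goals simpa using Nat.lt_succ_of_le (List.length_dropWhile_le _ _)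

def solution_alt (arr : List Int) : Int :=
  let s := PySem.List.sorted arr (fun x => x) false
  let n : Int := (s.length : Int)
  match solAltGo n s 0 n none with
  | some ans => ans + 1
  | none => 0

-- ===== PRECONDITION & SPEC =====
-- Pre_ excludes exactly the inputs where Python A raises (NameError: `answer` is never
-- assigned when every element equals every other, including empty and singleton lists);
-- B raises there too (TypeError on None + 1).
def Pre_solution (arr : List Int) : Prop := ∃ x ∈ arr, ∃ y ∈ arr, x ≠ y
instance (arr : List Int) : Decidable (Pre_solution arr) := by unfold Pre_solution; infer_instance
def pvWitness_solution : List Int := [3, 1, 2, 2]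

def Spec_solution (arr : List Int) (out : Int) : Prop := out = solution_alt arr
instance (arr : List Int) (out : Int) : Decidable (Spec_solution arr out) := by unfold Spec_solution; infer_instance

-- ===== CLAIM (what is proved, stated in full; the proofs are below) =====
def Claim_equal_solution : Prop := ∀ (arr : List Int), Dom_solution arr → Pre_solution arr → Spec_solution arr (solution arr)

-- ===== LEMMAS AND PROOFS =====

-- applying A's loop body twice with the same value is the same as applying it once
lemma solStep_step (s : List Int) (st : Int × Option Int) (val : Int) :
    solStep s (solStep s st val) val = solStep s st val := by
  simp only [solStep]
  split_ifs <;> rfl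

-- folding A's loop body over a run of copies of `val` does nothing after the first
lemma foldl_solStep_const (s : List Int) (val : Int) : ∀ (l : List Int) (st : Int × Option Int),
    (∀ x ∈ l, x = val) → l.foldl (solStep s) (solStep s st val) = solStep s st val := by
  intro l
  induction l with
  | nil => intro st _; rfl
  | cons x t ih =>
    intro st h
    have hx : x = val := h x (by simp)
    subst hx
    simp only [List.foldl_cons]
    rw [solStep_step]
    exact ih st (fun y hy => h y (List.mem_cons_of_mem _ hy))

-- in a sorted list whose elements are all ≥ val, everything after the leading
-- run of val's is strictly greater than val
lemma dropWhile_gt (val : Int) : ∀ (l : List Int), l.Pairwise (· ≤ ·) →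
    (∀ y ∈ l, val ≤ y) → ∀ y ∈ l.dropWhile (fun x => x == val), val < y := by
  intro l
  induction l with
  | nil => simp
  | cons x t ih =>
    intro hp hle y hy
    by_cases hx : x = val
    · rw [List.dropWhile_cons_of_pos (by simp [hx])] at hy
      exact ih (List.pairwise_cons.mp hp).2 (fun z hz => hle z (List.mem_cons_of_mem _ hz)) y hy
    · rw [List.dropWhile_cons_of_neg (by simp [hx])] at hy
      have hvx : val < x := lt_of_le_of_ne (hle x (by simp)) (fun h => hx h.symm)
      rcases List.mem_cons.mp hy with rfl | hyt
      · exact hvx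
      · exact lt_of_lt_of_le hvx ((List.pairwise_cons.mp hp).1 y hyt)

-- the main invariant: A's fold over the remaining suffix S of the sorted list s
-- computes the same answer as B's group-by-group walk, where the consumed prefix P
-- (all strictly below S) has length c
lemma go_eq (s : List Int) : ∀ (k : Nat) (S P : List Int) (best : Int) (ans : Option Int),
    S.length ≤ k →
    s = P ++ S →
    (∀ x ∈ P, ∀ y ∈ S, x < y) →
    S.Pairwise (· ≤ ·) →
    (S.foldl (solStep s) (best, ans)).2 = solAltGo (s.length : Int) S (P.length : Int) best ans := by
  intro k
  induction k with
  | zero =>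
    intro S P best ans hk _ _ _
    have : S = [] := List.eq_nil_of_length_eq_zero (Nat.le_zero.mp hk)
    subst this
    simp [solAltGo]
  | succ k ih =>
    intro S P best ans hk hsplit hlt hsorted
    cases S with
    | nil => simp [solAltGo]
    | cons val rest =>
      have hpc := List.pairwise_cons.mp hsorted
      set same := rest.takeWhile (fun x => x == val) with hsame_def
      set restr := rest.dropWhile (fun x => x == val) with hrestr_def
      have hrest : rest = same ++ restr := (List.takeWhile_append_dropWhile).symm
      have hsame_val : ∀ x ∈ same, x = val := by
        intro x hx
        simpa using List.mem_takeWhile_imp hx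
      have hrestr_gt : ∀ y ∈ restr, val < y := dropWhile_gt val rest hpc.2 hpc.1
      have hrestr_sorted : restr.Pairwise (· ≤ ·) :=
        hpc.2.sublist (List.dropWhile_sublist _)
      -- the filter in A's body keeps exactly restr
      have hfilter : (s.filter (fun i => decide (val < i))).length = restr.length := by
        have hs : s = P ++ val :: same ++ restr := by
          rw [hsplit, hrest]; simp
        rw [hs, List.filter_append, List.filter_append]
        have h1 : (P.filter (fun i => decide (val < i))) = [] := by
          rw [List.filter_eq_nil_iff]
          intro x hx
          have := hlt x hx val (by simp)
          simp
          omega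
        have h2 : ((val :: same).filter (fun i => decide (val < i))) = [] := by
          rw [List.filter_eq_nil_iff]
          intro x hx
          rcases List.mem_cons.mp hx with rfl | hx'
          · simp
          · have := hsame_val x hx'; subst this; simp
        have h3 : (restr.filter (fun i => decide (val < i))) = restr :=
          List.filter_eq_self.mpr (fun x hx => by simp [hrestr_gt x hx])
        rw [h1, h2, h3]; simp
      have hslen : s.length = P.length + 1 + same.length + restr.length := by
        rw [hsplit, hrest]; simp; omega
      -- A's one step on val equals B's one group step
      have hstep : solStep s (best, ans) val =
          (if |2 * ((P.length : Int) + 1 + (same.length : Int)) - (s.length : Int)| < best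
           then (|2 * ((P.length : Int) + 1 + (same.length : Int)) - (s.length : Int)|, some val)
           else (best, ans)) := by
        simp only [solStep, hfilter]
        have : (s.length : Int) - (restr.length : Int) -
            ((s.length : Int) - ((s.length : Int) - (restr.length : Int))) =
            2 * ((P.length : Int) + 1 + (same.length : Int)) - (s.length : Int) := by
          have := hslen; push_cast [this]; ring
        rw [this]
      -- unfold one step of B
      have hB : solAltGo (s.length : Int) (val :: rest) (P.length : Int) best ans =
          (if |2 * ((P.length : Int) + 1 + (same.length : Int)) - (s.length : Int)| < best
           then solAltGo (s.length : Int) restr ((P.length : Int) + 1 + (same.length : Int))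
                  (|2 * ((P.length : Int) + 1 + (same.length : Int)) - (s.length : Int)|) (some val)
           else solAltGo (s.length : Int) restr ((P.length : Int) + 1 + (same.length : Int))
                  best ans) := by
        rw [solAltGo]
      -- unfold A's fold: one step on val, a no-op run over same, then the fold over restr
      have hA : (val :: rest).foldl (solStep s) (best, ans) =
          restr.foldl (solStep s) (solStep s (best, ans) val) := by
        rw [List.foldl_cons]
        conv_lhs => rw [hrest]
        rw [List.foldl_append, foldl_solStep_const s val same _ hsame_val]
      -- invariant for the recursive call
      have hsplit' : s = (P ++ val :: same) ++ restr := by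
        rw [hsplit, hrest]; simp
      have hlt' : ∀ x ∈ P ++ val :: same, ∀ y ∈ restr, x < y := by
        intro x hx y hy
        rcases List.mem_append.mp hx with hxP | hxv
        · exact lt_trans (hlt x hxP val (by simp)) (hrestr_gt y hy)
        · rcases List.mem_cons.mp hxv with rfl | hxs
          · exact hrestr_gt y hy
          · rw [hsame_val x hxs]; exact hrestr_gt y hy
      have hklen : restr.length ≤ k := by
        have h1 : restr.length ≤ rest.length := List.length_dropWhile_le _ _
        simp at hk; omega
      have hplen' : ((P ++ val :: same).length : Int) = (P.length : Int) + 1 + (same.length : Int) := by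
        simp
        omega
      rw [hA, hstep, hB]
      split_ifs with hcond
      · rw [ih restr (P ++ val :: same) _ _ hklen hsplit' hlt' hrestr_sorted, hplen']
      · rw [ih restr (P ++ val :: same) _ _ hklen hsplit' hlt' hrestr_sorted, hplen']

-- the two ports agree on every input (even where Python raises, both ports return 0)
lemma solution_eq (arr : List Int) : solution arr = solution_alt arr := by
  simp only [solution, solution_alt]
  have hsorted : (PySem.List.sorted arr (fun x => x) false).Pairwise (· ≤ ·) := by
    have := PySem.List.sorted_pairwise (xs := arr) (key := fun x => x)
    simpa using this
  have key := go_eq (PySem.List.sorted arr (fun x => x) false)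
    (PySem.List.sorted arr (fun x => x) false).length
    (PySem.List.sorted arr (fun x => x) false) []
    ((PySem.List.sorted arr (fun x => x) false).length : Int) none
    le_rfl (by simp) (by simp) hsorted
  simp only [List.length_nil, Nat.cast_zero] at key
  rw [key]

-- ===== VERDICT (by name: the statement is the Claim_ definition above) =====
theorem solution_spec : Claim_equal_solution := by
  intro arr _ _
  exact (solution_eq arr).symm ▸ rfl
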